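-- pv_equiv track=rewrite | github.com/PennyLaneAI/pennylane | pennylane/qchem/vibrational/taylor_ham.py | _threebody_degs
-- ===== SOURCE A (Python) =====
-- import itertools
--
-- def _generate_bin_occupations(max_occ, nbins):
--     """
--     Generate all valid combinations of bin occupations for a given number of bins
--     and a total maximum occupancy.
--
--     Args:
--         max_occ(int): the maximum total number of items to be distributed across bins
--         nbins(int): the number of bins to distribute the items into
--
--     Returns
--         list(tuple): A list of tuples, where each tuple represents a valid combination of item counts for the bins.
--     """
--     combinations = list(itertools.product(range(max_occ + 1), repeat=nbins))
--
--     valid_combinations = [combo for combo in combinations if sum(combo) == max_occ]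
--
--     return valid_combinations
--
-- def _threebody_degs(max_deg, min_deg=3):
--     """Finds the degree of fit for three-body coefficients.
--
--     Args:
--         max_deg (int): maximum degree of Taylor form polynomial
--         min_deg (int): minimum degree of Taylor form polynomial
--
--     Returns:
--         list(tuple): A list of tuples `(q1deg, q2deg, q3deg)` where the sum of the three values is
--             guaranteed to be between the maximum total degree and minimum degree.
--     """
--     fit_degs = []
--     for feat_deg in range(min_deg, max_deg + 1):
--         max_deg = feat_deg - 3
--         if max_deg < 0:
--             continue
--         possible_occupations = _generate_bin_occupations(max_deg, 3)
--         for occ in possible_occupations: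
--             q1deg = 1 + occ[0]
--             q2deg = 1 + occ[1]
--             q3deg = 1 + occ[2]
--             fit_degs.append((q1deg, q2deg, q3deg))
--
--     return fit_degs
-- ===== SOURCE B (Python) =====
-- def _threebody_degs(max_deg, min_deg=3):
--     """Finds the degree of fit for three-body coefficients.
--
--     Directly enumerates the compositions (a, b, c) with a + b + c = feat_deg - 3
--     instead of filtering the full cubic product of ranges; simpler.
--     """
--     fit_degs = []
--     for feat_deg in range(max(min_deg, 3), max_deg + 1):
--         m = feat_deg - 3
--         for a in range(m + 1):
--             for b in range(m - a + 1):
--                 fit_degs.append((1 + a, 1 + b, 1 + (m - a - b)))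
--     return fit_degs
-- ===== Notes on version B (the rewrite author's own statement) =====
-- stated objective: simpler
-- what changed: Instead of materialising the full cubic product range(m+1)^3 per degree and filtering it for tuples summing to m, B enumerates the compositions (a, b, m-a-b) directly with two nested loops, producing the same tuples in the same lexicographic order.
import Mathlib
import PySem

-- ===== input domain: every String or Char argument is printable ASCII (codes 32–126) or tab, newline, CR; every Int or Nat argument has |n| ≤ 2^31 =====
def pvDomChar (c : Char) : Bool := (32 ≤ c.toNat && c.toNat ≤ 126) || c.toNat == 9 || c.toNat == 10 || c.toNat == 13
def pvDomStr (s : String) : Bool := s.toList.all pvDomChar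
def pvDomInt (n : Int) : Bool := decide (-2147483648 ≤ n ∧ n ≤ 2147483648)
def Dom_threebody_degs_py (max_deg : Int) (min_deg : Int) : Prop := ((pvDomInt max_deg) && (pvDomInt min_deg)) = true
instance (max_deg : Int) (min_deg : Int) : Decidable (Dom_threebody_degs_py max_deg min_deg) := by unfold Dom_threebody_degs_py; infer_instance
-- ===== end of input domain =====

-- B replaces A's filter-the-cubic-product enumeration by a direct two-loop enumeration of
-- the compositions (a, b, m-a-b); same tuples in the same order (objective: simpler).

-- ===== PORT A =====
-- itertools.product(xs, repeat=n): the first coordinate varies slowest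
def pyProductRep (xs : List Int) : Nat → List (List Int)
  | 0 => [[]]
  | n + 1 => xs.flatMap (fun x => (pyProductRep xs n).map (fun rest => x :: rest))

def generate_bin_occupations (max_occ : Int) (nbins : Int) : List (List Int) :=
  let combinations := pyProductRep (PySem.List.pyRange 0 (max_occ + 1) 1) nbins.toNat
  combinations.filter (fun combo => combo.sum == max_occ)

def threebody_degs_py (max_deg : Int) (min_deg : Int) : List (List Int) :=
  (PySem.List.pyRange min_deg (max_deg + 1) 1).foldl (fun fit_degs feat_deg =>
    let m := feat_deg - 3            -- Python rebinds max_deg here; the range was evaluated before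
    if m < 0 then fit_degs
    else
      (generate_bin_occupations m 3).foldl (fun fd occ =>
        -- occ[0], occ[1], occ[2]: every occ has exactly 3 entries, so the defaulted get is exact
        fd ++ [[1 + PySem.List.pyGetD occ 0 0, 1 + PySem.List.pyGetD occ 1 0,
                1 + PySem.List.pyGetD occ 2 0]]) fit_degs) []

-- ===== PORT B =====
def threebody_degs_py_alt (max_deg : Int) (min_deg : Int) : List (List Int) :=
  (PySem.List.pyRange (max min_deg 3) (max_deg + 1) 1).foldl (fun fit_degs feat_deg =>
    let m := feat_deg - 3
    (PySem.List.pyRange 0 (m + 1) 1).foldl (fun acc a =>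
      (PySem.List.pyRange 0 (m - a + 1) 1).foldl (fun acc2 b =>
        acc2 ++ [[1 + a, 1 + b, 1 + (m - a - b)]]) acc) fit_degs) []

-- ===== PRECONDITION & SPEC =====
def Spec_threebody_degs_py (max_deg : Int) (min_deg : Int) (out : List (List Int)) : Prop := out = threebody_degs_py_alt max_deg min_deg
instance (max_deg : Int) (min_deg : Int) (out : List (List Int)) : Decidable (Spec_threebody_degs_py max_deg min_deg out) := by unfold Spec_threebody_degs_py; infer_instance

-- ===== CLAIM (what is proved, stated in full; the proofs are below) =====
def Claim_equal_threebody_degs_py : Prop := ∀ (max_deg : Int) (min_deg : Int), Dom_threebody_degs_py max_deg min_deg → Spec_threebody_degs_py max_deg min_deg (threebody_degs_py max_deg min_deg)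

-- ===== LEMMAS AND PROOFS =====

theorem flatMap_ite_all_true {α : Type} (l : List Int) (p : Int → Prop) [DecidablePred p]
    (f : Int → α) (h : ∀ b ∈ l, p b) :
    l.flatMap (fun b => if p b then [f b] else []) = l.map f := by
  induction l with
  | nil => rfl
  | cons x xs ih =>
    simp only [List.flatMap_cons, List.map_cons, if_pos (h x List.mem_cons_self)]
    rw [ih (fun b hb => h b (List.mem_cons_of_mem _ hb))]
    rfl

theorem flatMap_ite_all_false {α : Type} (l : List Int) (p : Int → Prop) [DecidablePred p]
    (f : Int → α) (h : ∀ b ∈ l, ¬ p b) :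
    l.flatMap (fun b => if p b then [f b] else []) = [] := by
  induction l with
  | nil => rfl
  | cons x xs ih =>
    simp only [List.flatMap_cons, if_neg (h x List.mem_cons_self)]
    exact ih (fun b hb => h b (List.mem_cons_of_mem _ hb))

theorem filter_range_beq (N : Nat) (t : Int) :
    ((List.range N).map (fun k => Int.ofNat k)).filter (fun c => c == t)
      = if 0 ≤ t ∧ t < N then [t] else [] := by
  induction N with
  | zero => simp
  | succ n ih =>
    rw [List.range_succ, List.map_append, List.filter_append, ih]
    by_cases h : (Int.ofNat n) = t
    · simp [← h, Int.ofNat_eq_natCast]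
    · have hb : ((Int.ofNat n) == t) = false := by
        simp only [Int.ofNat_eq_natCast] at h ⊢; simp [h]
      simp only [List.map_cons, List.map_nil, List.filter_cons, hb]
      simp only [Int.ofNat_eq_natCast] at h ⊢
      split_ifs <;> simp_all <;> omega

theorem filter_pyRange_beq (n t : Int) :
    (PySem.List.pyRange 0 n 1).filter (fun c => c == t)
      = if 0 ≤ t ∧ t < n then [t] else [] := by
  rw [PySem.List.pyRange_one]
  have h0 : ∀ l : List Nat, l.map (fun k : Nat => (0 : Int) + k) = l.map (fun k => Int.ofNat k) := by
    intro l; apply List.map_congr_left; intro k _; simp [Int.ofNat_eq_natCast]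
  rw [h0, filter_range_beq]
  by_cases hn : 0 ≤ n
  · have : ((n - 0).toNat : Int) = n := by omega
    rw [this]
  · have : (n - 0).toNat = 0 := by omega
    rw [this]
    split_ifs with h1 h2 <;> first | rfl | (exfalso; omega)

theorem flatMap_range_if {α : Type} (n k : Int) (f : Int → α) (hk : 0 ≤ k) (hkn : k < n) :
    (PySem.List.pyRange 0 n 1).flatMap (fun b => if b ≤ k then [f b] else [])
      = (PySem.List.pyRange 0 (k + 1) 1).map f := by
  rw [PySem.List.pyRange_one_append 0 (k + 1) n (by omega) (by omega), List.flatMap_append]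
  rw [flatMap_ite_all_true _ _ f (by intro b hb; rw [PySem.List.mem_pyRange_one] at hb; omega)]
  rw [flatMap_ite_all_false _ _ f (by intro b hb; rw [PySem.List.mem_pyRange_one] at hb; omega)]
  rw [List.append_nil]

theorem flatMap_ite_eq_map_filter {α : Type} (l : List Int) (t : Int) (g : Int → α) :
    l.flatMap (fun c => if c = t then [g c] else []) = (l.filter (fun c => c == t)).map g := by
  induction l with
  | nil => rfl
  | cons x xs ih =>
    by_cases h : x = t
    · simp only [List.flatMap_cons, List.filter_cons, beq_iff_eq, if_pos h, List.map_cons]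
      rw [ih]; rfl
    · have hb : (x == t) = false := by simp [h]
      simp only [List.flatMap_cons, if_neg h, List.filter_cons, hb, List.nil_append]
      simpa using ih

-- characterisation of A's per-degree occupation list as B's two-loop enumeration
theorem occs_eq (m : Int) :
    generate_bin_occupations m 3
      = (PySem.List.pyRange 0 (m + 1) 1).flatMap (fun a =>
          (PySem.List.pyRange 0 (m - a + 1) 1).map (fun b => [a, b, m - a - b])) := by
  unfold generate_bin_occupations
  show (pyProductRep (PySem.List.pyRange 0 (m + 1) 1) 3).filter (fun combo => combo.sum == m) = _
  simp only [pyProductRep, List.filter_flatMap, List.map_flatMap, List.filter_map, List.map_map,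
    Function.comp_def, List.filter_cons, List.filter_nil, List.sum_cons, List.sum_nil, beq_iff_eq,
    apply_ite (List.map fun rest => _ :: rest), List.map_cons, List.map_nil]
  apply List.flatMap_congr
  intro a ha
  rw [PySem.List.mem_pyRange_one] at ha
  have hstep : ∀ b ∈ PySem.List.pyRange 0 (m + 1) 1,
      (PySem.List.pyRange 0 (m + 1) 1).flatMap
        (fun c => if a + (b + (c + 0)) = m then [[a, b, c]] else [])
      = (if b ≤ m - a then [[a, b, m - a - b]] else []) := by
    intro b hb
    rw [PySem.List.mem_pyRange_one] at hb
    have hcond : ∀ c : Int, (a + (b + (c + 0)) = m) = (c = m - a - b) := by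
      intro c; apply propext; constructor <;> (intro; omega)
    simp only [hcond]
    rw [flatMap_ite_eq_map_filter _ _ (fun c => [a, b, c]), filter_pyRange_beq]
    by_cases hle : b ≤ m - a
    · rw [if_pos (by omega), if_pos hle]; rfl
    · rw [if_neg (by omega), if_neg hle]; rfl
  rw [List.flatMap_congr hstep]
  have : (fun b : Int => if b ≤ m - a then ([[a, b, m - a - b]] : List (List Int)) else [])
      = (fun b : Int => if b ≤ m - a then [(fun b => [a, b, m - a - b]) b] else []) := rfl
  rw [this, flatMap_range_if (m + 1) (m - a) _ (by omega) (by omega)]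

-- per-degree contribution shared by both programs (B's inner double loop, flattened)
def degBlock (m : Int) : List (List Int) :=
  (PySem.List.pyRange 0 (m + 1) 1).flatMap (fun a =>
    (PySem.List.pyRange 0 (m - a + 1) 1).map (fun b => [1 + a, 1 + b, 1 + (m - a - b)]))

theorem mapped_occs_eq (m : Int) :
    (generate_bin_occupations m 3).map
      (fun occ => [1 + PySem.List.pyGetD occ 0 0, 1 + PySem.List.pyGetD occ 1 0,
                   1 + PySem.List.pyGetD occ 2 0])
      = degBlock m := by
  rw [occs_eq m, degBlock, List.map_flatMap]
  apply List.flatMap_congr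
  intro a _
  rw [List.map_map]
  apply List.map_congr_left
  intro b _
  simp [PySem.List.pyGetD]

theorem foldl_guard {α : Type} (l : List Int) (p : Int → Prop) [DecidablePred p]
    (g : Int → List α) (acc : List α) :
    l.foldl (fun acc s => if p s then acc else acc ++ g s) acc
      = acc ++ l.flatMap (fun s => if p s then [] else g s) := by
  induction l generalizing acc with
  | nil => simp
  | cons x xs ih =>
    by_cases h : p x
    · simp [h, ih]
    · simp [h, ih]

theorem A_eq (max_deg min_deg : Int) :
    threebody_degs_py max_deg min_deg
      = (PySem.List.pyRange min_deg (max_deg + 1) 1).flatMap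
          (fun s => if s - 3 < 0 then [] else degBlock (s - 3)) := by
  unfold threebody_degs_py
  simp only [PySem.List.foldl_append_singleton_eq_map, mapped_occs_eq]
  rw [foldl_guard, List.nil_append]

theorem B_eq (max_deg min_deg : Int) :
    threebody_degs_py_alt max_deg min_deg
      = (PySem.List.pyRange (max min_deg 3) (max_deg + 1) 1).flatMap
          (fun s => degBlock (s - 3)) := by
  unfold threebody_degs_py_alt
  simp only [PySem.List.foldl_append_singleton_eq_map, PySem.List.foldl_append_eq_flatMap]
  rw [List.nil_append]
  rfl

theorem final_eq (max_deg min_deg : Int) :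
    threebody_degs_py max_deg min_deg = threebody_degs_py_alt max_deg min_deg := by
  rw [A_eq, B_eq]
  have hcongr : ∀ (l : List Int), (∀ s ∈ l, 3 ≤ s) →
      l.flatMap (fun s => if s - 3 < 0 then [] else degBlock (s - 3))
        = l.flatMap (fun s => degBlock (s - 3)) := by
    intro l hl
    apply List.flatMap_congr
    intro s hs
    rw [if_neg (by have := hl s hs; omega)]
  by_cases h3 : 3 ≤ min_deg
  · rw [max_eq_left h3]
    apply hcongr
    intro s hs
    rw [PySem.List.mem_pyRange_one] at hs
    omega
  · rw [max_eq_right (by omega)]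
    by_cases hhi : max_deg + 1 ≤ 3
    · rw [PySem.List.pyRange_one_eq_nil hhi, List.flatMap_nil]
      apply List.flatMap_eq_nil_iff.mpr
      intro s hs
      rw [PySem.List.mem_pyRange_one] at hs
      rw [if_pos (by omega)]
    · rw [PySem.List.pyRange_one_append min_deg 3 (max_deg + 1) (by omega) (by omega),
        List.flatMap_append]
      have h1 : (PySem.List.pyRange min_deg 3 1).flatMap
          (fun s => if s - 3 < 0 then [] else degBlock (s - 3)) = [] := by
        apply List.flatMap_eq_nil_iff.mpr
        intro s hs
        rw [PySem.List.mem_pyRange_one] at hs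
        rw [if_pos (by omega)]
      rw [h1, List.nil_append]
      apply hcongr
      intro s hs
      rw [PySem.List.mem_pyRange_one] at hs
      omega

-- ===== VERDICT (by name: the statement is the Claim_ definition above) =====
theorem threebody_degs_py_spec : Claim_equal_threebody_degs_py := by
  intro max_deg min_deg _
  unfold Spec_threebody_degs_py
  exact final_eq max_deg min_deg
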